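-- pv_equiv track=rewrite | github.com/yashpandey474/Competitive-Coding | Python/Dynamic Programming/break_number.py | breakNumber
-- ===== SOURCE A (Python) =====
-- def breakNumber(n):
--     # Write your code here.
--
--     result = []
--     cache = {}
--
--     def dfs(number, answer, index):
--         if number == 0:
--             result.append(answer)
--
--         if number < 0:
--             return
--
--         for i in range(index, number + 1):
--             dfs(number - i, answer + [i], i)
--
--     dfs(n, [], 1)
--     return result
-- ===== SOURCE B (Python) =====
-- def breakNumber(n):
--     # Take-or-skip recursion: parts(number, minPart) returns every nondecreasing
--     # partition of number with parts >= minPart, in lexicographic order, by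
--     # deciding for the single candidate part minPart whether it is used first
--     # or skipped forever -- no range loop at all.
--     def parts(number, minPart):
--         if number == 0:
--             return [[]]
--         if minPart > number:
--             return []
--         taken = [[minPart] + tail for tail in parts(number - minPart, minPart)]
--         taken += parts(number, minPart + 1)
--         return taken
--     return parts(n, 1)
-- ===== Notes on version B (the rewrite author's own statement) =====
-- stated objective: alternative
-- what changed: Replaces A's shared mutable result list and dfs with a for-loop over range(index, number+1) by a pure take-or-skip binary recursion parts(number, minPart) with no loop: either the single candidate part minPart is used first or it is skipped forever; Pre_ conservatively excludes large n, where both programs' ~n-deep recursion exhausts CPython's recursion limit (RecursionError).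
import Mathlib
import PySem

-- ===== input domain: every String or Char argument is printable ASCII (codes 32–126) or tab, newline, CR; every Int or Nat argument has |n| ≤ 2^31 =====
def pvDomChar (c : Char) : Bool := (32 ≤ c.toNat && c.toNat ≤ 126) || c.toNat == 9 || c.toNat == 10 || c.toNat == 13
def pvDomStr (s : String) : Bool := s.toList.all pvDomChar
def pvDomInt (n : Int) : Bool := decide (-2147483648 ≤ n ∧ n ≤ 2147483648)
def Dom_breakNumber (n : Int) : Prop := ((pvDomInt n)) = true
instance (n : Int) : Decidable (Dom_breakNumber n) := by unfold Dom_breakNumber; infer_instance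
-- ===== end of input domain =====

-- B replaces A's shared-accumulator dfs with a range loop by a pure take-or-skip
-- binary recursion on (number, minPart) with no loop at all (objective: alternative).

-- ===== PORT A =====
-- A's inner dfs; the fuel parameter only makes the recursion total (one unit per
-- call; n.toNat + 1 suffices since every recursive call decreases number by ≥ 1).
def pvDfsA (fuel : Nat) (number : Int) (answer : List Int) (index : Int)
    (result : List (List Int)) : List (List Int) :=
  match fuel with
  | 0 => result
  | fuel + 1 =>
    let result := if number == 0 then result ++ [answer] else result
    if number < 0 then result
    else (PySem.List.pyRange index (number + 1) 1).foldl
        (fun res i => pvDfsA fuel (number - i) (answer ++ [i]) i res) result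

def breakNumber (n : Int) : List (List Int) := pvDfsA (n.toNat + 1) n [] 1 []

-- ===== PORT B =====
-- B's parts(number, minPart): take minPart once, or skip it for good.  The fuel
-- only makes the recursion total (one unit per call; every call decreases
-- number - minPart by ≥ 1, so n.toNat + 2 suffices from (n, 1)).
def pvBinParts (fuel : Nat) (number : Int) (minPart : Int) : List (List Int) :=
  match fuel with
  | 0 => []
  | fuel + 1 =>
    if number == 0 then [[]]
    else if minPart > number then []
    else ((pvBinParts fuel (number - minPart) minPart).map (fun tail => minPart :: tail))
        ++ pvBinParts fuel number (minPart + 1)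

def breakNumber_alt (n : Int) : List (List Int) := pvBinParts (n.toNat + 2) n 1

-- ===== PRECONDITION & SPEC =====
-- Pre_ conservatively excludes large n, where both Pythons' deep recursion
-- (depth ≈ n) exhausts CPython's recursion limit and raises RecursionError
-- (the exact crash point depends on the interpreter's recursion limit and the
-- caller's stack depth).
def Pre_breakNumber (n : Int) : Prop := n ≤ 900
instance (n : Int) : Decidable (Pre_breakNumber n) := by unfold Pre_breakNumber; infer_instance
def pvWitness_breakNumber : Int := (6)
def Spec_breakNumber (n : Int) (out : List (List Int)) : Prop := out = breakNumber_alt n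
instance (n : Int) (out : List (List Int)) : Decidable (Spec_breakNumber n out) := by unfold Spec_breakNumber; infer_instance

-- ===== CLAIM (what is proved, stated in full; the proofs are below) =====
def Claim_equal_breakNumber : Prop := ∀ (n : Int), Dom_breakNumber n → Pre_breakNumber n → Spec_breakNumber n (breakNumber n)

-- ===== LEMMAS AND PROOFS =====

-- Proof-only intermediate: the list of nondecreasing partitions of `number`
-- with parts ≥ `index`, written as a flatMap over the same range A loops over.
def pvParts (fuel : Nat) (number : Int) (index : Int) : List (List Int) :=
  match fuel with
  | 0 => []
  | fuel + 1 =>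
    if number == 0 then [[]]
    else (PySem.List.pyRange index (number + 1) 1).flatMap
        (fun i => (pvParts fuel (number - i) i).map (fun tail => i :: tail))

lemma pvDfsA_eq (fuel : Nat) : ∀ (number index : Int) (answer : List Int)
    (result : List (List Int)), 1 ≤ index →
    pvDfsA fuel number answer index result
      = result ++ (pvParts fuel number index).map (fun t => answer ++ t) := by
  induction fuel with
  | zero => intro number index answer result _; simp [pvDfsA, pvParts]
  | succ fuel ih =>
    intro number index answer result hidx
    have key : ∀ m : Int, ¬ m = 0 → ((m == 0) = false) := by intro m hm; simp [hm]
    rcases lt_trichotomy number 0 with hneg | hzero | hpos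
    · have hnil : PySem.List.pyRange index (number + 1) 1 = [] :=
        PySem.List.pyRange_one_eq_nil (by omega)
      simp [pvDfsA, pvParts, hnil, key number (by omega), hneg]
    · subst hzero
      have hnil : PySem.List.pyRange index (1:Int) 1 = [] :=
        PySem.List.pyRange_one_eq_nil (by omega)
      simp [pvDfsA, pvParts, hnil]
    · have h0 : (number == 0) = false := key number (by omega)
      have hcongr : (PySem.List.pyRange index (number + 1) 1).foldl
          (fun res i => pvDfsA fuel (number - i) (answer ++ [i]) i res) result
        = (PySem.List.pyRange index (number + 1) 1).foldl
          (fun res i => res ++ ((pvParts fuel (number - i) i).map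
              (fun tail => i :: tail)).map (fun t => answer ++ t)) result := by
        apply PySem.List.foldl_congr_mem
        intro res i hi
        have hi1 : 1 ≤ i := by
          have := (PySem.List.mem_pyRange_one.mp hi).1; omega
        rw [ih (number - i) i (answer ++ [i]) res hi1]
        simp [List.map_map, Function.comp]
      simp only [pvDfsA, pvParts, h0, Bool.false_eq_true, if_false,
        if_neg (show ¬ number < 0 by omega)]
      rw [hcongr, PySem.List.foldl_append_eq_flatMap]
      simp [List.map_flatMap]

lemma pvBinParts_eq (fuel : Nat) : ∀ (fuel' : Nat) (number minPart : Int),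
    1 ≤ minPart → (number - minPart + 1).toNat < fuel → number.toNat < fuel' →
    pvBinParts fuel number minPart = pvParts fuel' number minPart := by
  induction fuel with
  | zero => intro fuel' number minPart _ h _; omega
  | succ fuel ih =>
    intro fuel' number minPart hmin hf hf'
    obtain ⟨g, rfl⟩ : ∃ g, fuel' = g + 1 := ⟨fuel' - 1, by omega⟩
    by_cases h0 : number = 0
    · subst h0; simp [pvBinParts, pvParts]
    · have h0' : ((number == 0) = false) := by simp [h0]
      by_cases hgt : minPart > number
      · have hnil : PySem.List.pyRange minPart (number + 1) 1 = [] :=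
          PySem.List.pyRange_one_eq_nil (by omega)
        simp [pvBinParts, pvParts, h0', hgt, hnil]
      · have hpos : 1 ≤ number := by omega
        have htake : pvBinParts fuel (number - minPart) minPart
            = pvParts g (number - minPart) minPart :=
          ih g (number - minPart) minPart hmin (by omega) (by omega)
        have hskip : pvBinParts fuel number (minPart + 1)
            = pvParts (g + 1) number (minPart + 1) :=
          ih (g + 1) number (minPart + 1) (by omega) (by omega) (by omega)
        have hcons : PySem.List.pyRange minPart (number + 1) 1
            = minPart :: PySem.List.pyRange (minPart + 1) (number + 1) 1 :=
          PySem.List.pyRange_one_cons (by omega)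
        simp only [pvBinParts, pvParts, h0', Bool.false_eq_true, if_false,
          if_neg hgt, hcons, List.flatMap_cons]
        rw [htake, hskip]
        simp [pvParts, h0']

-- ===== VERDICT (by name: the statement is the Claim_ definition above) =====
theorem breakNumber_spec : Claim_equal_breakNumber := by
  intro n _ _
  unfold Spec_breakNumber breakNumber breakNumber_alt
  rw [pvDfsA_eq _ n 1 [] [] (by omega),
    pvBinParts_eq (n.toNat + 2) (n.toNat + 1) n 1 (by omega) (by omega) (by omega)]
  simp
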